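-- pv_equiv track=rewrite | github.com/vochong/QuadraticSums | series/math105.py | exp2a
-- ===== SOURCE A (Python) =====
-- def cmult(a,b,p):
--     t1 = (a[0]*b[0])%p
--     t2 = (a[1]*b[1])%p
--     t2 = (p-t2)%p
--     t3 = (t1+t2)%p
--
--     t1 = (a[0]*b[1])%p
--     t2 = (a[1]*b[0])%p
--     t4 = (t1+t2)%p
--
--     t = [t3,t4]
--     return(t)
--
-- def exp2a(e,g,n):
--     t = [1,0]
--     sq = g
--     e1 = e
--     while(e1!=0):
--         if (e1%2)==1:
--             t = cmult(sq,t,n)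
--             e1 = (e1-1)//2
--         else:
--             e1 = e1//2
--         sq = cmult(sq,sq,n)
--     return(t)
-- ===== SOURCE B (Python) =====
-- def cmult(a, b, p):
--     t1 = (a[0]*b[0])%p
--     t2 = (a[1]*b[1])%p
--     t2 = (p-t2)%p
--     t3 = (t1+t2)%p
--
--     t1 = (a[0]*b[1])%p
--     t2 = (a[1]*b[0])%p
--     t4 = (t1+t2)%p
--
--     return [t3, t4]
--
-- def exp2a(e, g, n):
--     if e == 0:
--         return [1, 0]
--     h = exp2a(e // 2, g, n)
--     sq = cmult(h, h, n)
--     return cmult(g, sq, n) if e % 2 == 1 else sq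
-- ===== Notes on version B (the rewrite author's own statement) =====
-- stated objective: alternative
-- what changed: Replaces the iterative least-significant-bit square-and-multiply loop (accumulator t and running square sq) by a top-down divide-and-conquer recursion on the exponent (recurse on e//2, square the result, multiply by g when e is odd); cmult is kept unchanged.
import Mathlib
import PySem

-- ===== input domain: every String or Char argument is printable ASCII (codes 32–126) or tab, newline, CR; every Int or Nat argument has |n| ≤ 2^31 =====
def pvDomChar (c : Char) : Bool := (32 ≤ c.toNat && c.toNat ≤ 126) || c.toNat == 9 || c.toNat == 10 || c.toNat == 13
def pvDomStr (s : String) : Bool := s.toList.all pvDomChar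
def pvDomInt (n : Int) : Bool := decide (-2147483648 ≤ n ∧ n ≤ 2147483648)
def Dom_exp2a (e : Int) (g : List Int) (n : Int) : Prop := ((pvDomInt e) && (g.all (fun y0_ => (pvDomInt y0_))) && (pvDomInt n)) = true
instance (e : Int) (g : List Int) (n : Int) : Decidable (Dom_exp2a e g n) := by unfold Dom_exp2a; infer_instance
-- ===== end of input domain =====

-- B replaces A's iterative LSB square-and-multiply loop by a top-down divide-and-conquer
-- recursion on the exponent (same cost, different decomposition); cmult is unchanged.


-- ===== PORT A =====
-- cmult as in the Python (shared verbatim by both sources); indices 0/1 read with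
-- default 0 — Pre_ guarantees cmult is only reached with lists of length ≥ 2.
def cmultP (a b : List Int) (p : Int) : List Int :=
  let t1 := PySem.Int.mod (PySem.List.pyGetD a 0 0 * PySem.List.pyGetD b 0 0) p
  let t2 := PySem.Int.mod (PySem.List.pyGetD a 1 0 * PySem.List.pyGetD b 1 0) p
  let t2 := PySem.Int.mod (p - t2) p
  let t3 := PySem.Int.mod (t1 + t2) p
  let t1' := PySem.Int.mod (PySem.List.pyGetD a 0 0 * PySem.List.pyGetD b 1 0) p
  let t2' := PySem.Int.mod (PySem.List.pyGetD a 1 0 * PySem.List.pyGetD b 0 0) p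
  let t4 := PySem.Int.mod (t1' + t2') p
  [t3, t4]

-- A's while loop: e1 strictly decreases while positive, so e.toNat + 1 fuel suffices
-- on the admitted domain (0 ≤ e); the fuel is a totality guard, not a change of algorithm.
def exp2aLoop (fuel : Nat) (e1 : Int) (t sq : List Int) (n : Int) : List Int :=
  match fuel with
  | 0 => t
  | fuel + 1 =>
    if e1 ≠ 0 then
      if PySem.Int.mod e1 2 = 1 then
        exp2aLoop fuel (PySem.Int.floordiv (e1 - 1) 2) (cmultP sq t n) (cmultP sq sq n) n
      else
        exp2aLoop fuel (PySem.Int.floordiv e1 2) t (cmultP sq sq n) n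
    else t

def exp2a (e : Int) (g : List Int) (n : Int) : List Int :=
  exp2aLoop (e.toNat + 1) e [1, 0] g n

-- ===== PORT B =====
-- divide-and-conquer on the exponent; for 0 ≤ e, e // 2 is e.toNat / 2, so the
-- recursion is on the Nat exponent (faithful on Pre_, where 0 ≤ e).
def exp2aRec (k : Nat) (g : List Int) (n : Int) : List Int :=
  if h : k = 0 then [1, 0]
  else
    let hh := exp2aRec (k / 2) g n
    let sq := cmultP hh hh n
    if k % 2 = 1 then cmultP g sq n else sq
decreasing_by exact Nat.div_lt_self (Nat.pos_of_ne_zero h) (by omega)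

def exp2a_alt (e : Int) (g : List Int) (n : Int) : List Int :=
  exp2aRec e.toNat g n

-- ===== PRECONDITION & SPEC =====
-- Pre_ excludes exactly the inputs where the Python A does not return normally:
-- e < 0 (the while loop never terminates), n = 0 (ZeroDivisionError in cmult),
-- and g shorter than 2 when e ≠ 0 (IndexError in cmult).
def Pre_exp2a (e : Int) (g : List Int) (n : Int) : Prop :=
  0 ≤ e ∧ n ≠ 0 ∧ (e = 0 ∨ 2 ≤ g.length)
instance (e : Int) (g : List Int) (n : Int) : Decidable (Pre_exp2a e g n) := by unfold Pre_exp2a; infer_instance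
def pvWitness_exp2a : Int × List Int × Int := (5, [2, 3], 7)

def Spec_exp2a (e : Int) (g : List Int) (n : Int) (out : List Int) : Prop := out = exp2a_alt e g n
instance (e : Int) (g : List Int) (n : Int) (out : List Int) : Decidable (Spec_exp2a e g n out) := by unfold Spec_exp2a; infer_instance

-- ===== CLAIM (what is proved, stated in full; the proofs are below) =====
def Claim_equal_exp2a : Prop := ∀ (e : Int) (g : List Int) (n : Int), Dom_exp2a e g n → Pre_exp2a e g n → Spec_exp2a e g n (exp2a e g n)

-- ===== LEMMAS AND PROOFS =====

-- Abstraction: a 2-element list as a Gaussian integer (ℤ√(-1)), reduction mod n.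
def pil (xs : List Int) : Zsqrtd (-1) :=
  ⟨PySem.List.pyGetD xs 0 0, PySem.List.pyGetD xs 1 0⟩

def l2 (z : Zsqrtd (-1)) : List Int := [z.re, z.im]

def gred (n : Int) (z : Zsqrtd (-1)) : Zsqrtd (-1) :=
  ⟨PySem.Int.mod z.re n, PySem.Int.mod z.im n⟩

-- componentwise congruence mod n
def Rn (n : Int) (a b : Zsqrtd (-1)) : Prop := n ∣ (a.re - b.re) ∧ n ∣ (a.im - b.im)

theorem pymod_sub_dvd (p x : Int) : p ∣ (PySem.Int.mod x p - x) := by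
  have h := PySem.Int.floordiv_mul_add_mod x p
  exact ⟨-(PySem.Int.floordiv x p), by linarith⟩

theorem pymod_congr {p : Int} (hp : p ≠ 0) {a b : Int} (h : p ∣ (a - b)) :
    PySem.Int.mod a p = PySem.Int.mod b p := by
  have hd : p ∣ (PySem.Int.mod a p - PySem.Int.mod b p) := by
    have h1 := pymod_sub_dvd p a
    have h2 := pymod_sub_dvd p b
    have : PySem.Int.mod a p - PySem.Int.mod b p =
        (PySem.Int.mod a p - a) - (PySem.Int.mod b p - b) + (a - b) := by ring
    rw [this]
    exact dvd_add (dvd_sub h1 h2) h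
  have habs : |PySem.Int.mod a p - PySem.Int.mod b p| < |p| := by
    rcases lt_or_gt_of_ne hp with hneg | hpos
    · have b1 := PySem.Int.mod_neg_bounds (a := a) hneg
      have b2 := PySem.Int.mod_neg_bounds (a := b) hneg
      rw [abs_of_neg hneg] at *
      rw [abs_lt]; omega
    · have b1l := PySem.Int.mod_nonneg (a := a) hpos
      have b1u := PySem.Int.mod_lt (a := a) hpos
      have b2l := PySem.Int.mod_nonneg (a := b) hpos
      have b2u := PySem.Int.mod_lt (a := b) hpos
      rw [abs_of_pos hpos]; rw [abs_lt]; omega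
  have := Int.eq_zero_of_abs_lt_dvd ((abs_dvd p _).mpr hd) habs
  omega

theorem Rn_gred (n : Int) (z : Zsqrtd (-1)) : Rn n (gred n z) z :=
  ⟨pymod_sub_dvd n z.re, pymod_sub_dvd n z.im⟩

theorem Rn_refl (n : Int) (z : Zsqrtd (-1)) : Rn n z z := ⟨⟨0, by ring⟩, ⟨0, by ring⟩⟩

theorem Rn_mul {n : Int} {a a' b b' : Zsqrtd (-1)} (ha : Rn n a a') (hb : Rn n b b') :
    Rn n (a * b) (a' * b') := by
  obtain ⟨⟨c1, hc1⟩, ⟨c2, hc2⟩⟩ := ha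
  obtain ⟨⟨d1, hd1⟩, ⟨d2, hd2⟩⟩ := hb
  constructor
  · exact ⟨b'.re * c1 + a.re * d1 - b'.im * c2 - a.im * d2, by
      simp only [Zsqrtd.re_mul]
      linear_combination b'.re * hc1 + a.re * hd1 - b'.im * hc2 - a.im * hd2⟩
  · exact ⟨b'.im * c1 + a.re * d2 + b'.re * c2 + a.im * d1, by
      simp only [Zsqrtd.im_mul]
      linear_combination b'.im * hc1 + a.re * hd2 + b'.re * hc2 + a.im * hd1⟩

theorem Rn_pow {n : Int} {a b : Zsqrtd (-1)} (h : Rn n a b) (k : Nat) :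
    Rn n (a ^ k) (b ^ k) := by
  induction k with
  | zero => simpa using Rn_refl n 1
  | succ k ih => rw [pow_succ, pow_succ]; exact Rn_mul ih h

theorem gred_congr {n : Int} (hn : n ≠ 0) {a b : Zsqrtd (-1)} (h : Rn n a b) :
    gred n a = gred n b := by
  obtain ⟨h1, h2⟩ := h
  unfold gred
  rw [pymod_congr hn h1, pymod_congr hn h2]

theorem pil_l2 (z : Zsqrtd (-1)) : pil (l2 z) = z := by
  simp [pil, l2, PySem.List.pyGetD, PySem.List.pyGet?, PySem.List.pyIdx?]

theorem cmultP_eq {n : Int} (hn : n ≠ 0) (a b : List Int) :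
    cmultP a b n = l2 (gred n (pil a * pil b)) := by
  unfold cmultP l2 gred pil
  simp only [Zsqrtd.re_mul, Zsqrtd.im_mul]
  refine List.cons_eq_cons.mpr ⟨?_, List.cons_eq_cons.mpr ⟨?_, rfl⟩⟩
  · -- real part
    apply pymod_congr hn
    have d1 := pymod_sub_dvd n (PySem.List.pyGetD a 0 0 * PySem.List.pyGetD b 0 0)
    have d2 := pymod_sub_dvd n (PySem.List.pyGetD a 1 0 * PySem.List.pyGetD b 1 0)
    have d3 := pymod_sub_dvd n
      (n - PySem.Int.mod (PySem.List.pyGetD a 1 0 * PySem.List.pyGetD b 1 0) n)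
    obtain ⟨c1, hc1⟩ := d1; obtain ⟨c2, hc2⟩ := d2; obtain ⟨c3, hc3⟩ := d3
    exact ⟨c1 + c3 - c2 + 1, by nlinarith [hc1, hc2, hc3]⟩
  · -- imaginary part
    apply pymod_congr hn
    have d1 := pymod_sub_dvd n (PySem.List.pyGetD a 0 0 * PySem.List.pyGetD b 1 0)
    have d2 := pymod_sub_dvd n (PySem.List.pyGetD a 1 0 * PySem.List.pyGetD b 0 0)
    obtain ⟨c1, hc1⟩ := d1; obtain ⟨c2, hc2⟩ := d2
    exact ⟨c1 + c2, by linarith [hc1, hc2]⟩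

-- reduction of an already-congruent product collapses
theorem gred_mul_gred_left {n : Int} (hn : n ≠ 0) (a b : Zsqrtd (-1)) :
    gred n (gred n a * b) = gred n (a * b) :=
  gred_congr hn (Rn_mul (Rn_gred n a) (Rn_refl n b))

theorem gred_mul_gred_right {n : Int} (hn : n ≠ 0) (a b : Zsqrtd (-1)) :
    gred n (a * gred n b) = gred n (a * b) :=
  gred_congr hn (Rn_mul (Rn_refl n a) (Rn_gred n b))

theorem gred_mul_pow_gred {n : Int} (hn : n ≠ 0) (a b : Zsqrtd (-1)) (k : Nat) :
    gred n (a * (gred n b) ^ k) = gred n (a * b ^ k) :=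
  gred_congr hn (Rn_mul (Rn_refl n a) (Rn_pow (Rn_gred n b) k))

-- A-side loop invariant: for k ≥ 1 and enough fuel the loop computes red (t · sq^k)
theorem exp2aLoop_eq {n : Int} (hn : n ≠ 0) :
    ∀ (k : Nat) (fuel : Nat) (t sq : List Int), 1 ≤ k → k ≤ fuel →
      exp2aLoop fuel (k : Int) t sq n = l2 (gred n (pil t * pil sq ^ k)) := by
  intro k
  induction k using Nat.strong_induction_on with
  | _ k ih =>
    intro fuel t sq hk hfuel
    match fuel with
    | 0 => omega
    | fuel + 1 =>
      rw [exp2aLoop]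
      have hk0 : ((k : Int) ≠ 0) := by omega
      rw [if_pos hk0]
      have hmod : PySem.Int.mod (k : Int) 2 = ((k % 2 : Nat) : Int) := PySem.Int.mod_natCast k 2
      by_cases hodd : k % 2 = 1
      · rw [hmod, hodd, if_pos (show ((1:Nat):Int) = 1 by norm_num)]
        have hfd : PySem.Int.floordiv ((k : Int) - 1) 2 = (((k - 1) / 2 : Nat) : Int) := by
          rw [PySem.Int.floordiv_eq_ediv_of_pos (by omega)]; omega
        rw [hfd]
        set m := (k - 1) / 2 with hm
        by_cases hm0 : m = 0
        · -- k = 1 : the recursive call returns its t immediately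
          have hk1 : k = 1 := by omega
          subst hk1
          have : exp2aLoop fuel ((0 : Nat) : Int) (cmultP sq t n) (cmultP sq sq n) n
              = cmultP sq t n := by
            match fuel with
            | 0 => rfl
            | fuel + 1 => rw [exp2aLoop]; simp
          simp only [hm0] at this ⊢
          rw [this, cmultP_eq hn, pow_one]
          rw [show pil sq * pil t = pil t * pil sq from mul_comm _ _]
        · have hm1 : 1 ≤ m := by omega
          have hmlt : m < k := by omega
          have hmf : m ≤ fuel := by omega
          rw [ih m hmlt fuel (cmultP sq t n) (cmultP sq sq n) hm1 hmf]
          rw [cmultP_eq hn, cmultP_eq hn, pil_l2, pil_l2]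
          rw [gred_mul_pow_gred hn, gred_mul_gred_left hn]
          congr 1
          have hk2 : k = 2 * m + 1 := by omega
          rw [hk2, pow_succ, two_mul, pow_add, mul_pow]
          ring
      · have heven : k % 2 = 0 := by omega
        have hne : ¬ (((k % 2 : Nat) : Int) = 1) := by rw [heven]; omega
        have hfd : PySem.Int.floordiv ((k : Int)) 2 = ((k / 2 : Nat) : Int) := by
          rw [PySem.Int.floordiv_eq_ediv_of_pos (by omega)]; omega
        rw [hmod, if_neg hne, hfd]
        set m := k / 2 with hm
        have hm1 : 1 ≤ m := by omega
        have hmlt : m < k := by omega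
        have hmf : m ≤ fuel := by omega
        rw [ih m hmlt fuel t (cmultP sq sq n) hm1 hmf]
        rw [cmultP_eq hn, pil_l2]
        rw [gred_mul_pow_gred hn]
        congr 1
        have hk2 : k = 2 * m := by omega
        rw [hk2, two_mul, pow_add, mul_pow]

-- B-side: for k ≥ 1 the recursion computes red (g^k)
theorem exp2aRec_eq {n : Int} (hn : n ≠ 0) (g : List Int) :
    ∀ (k : Nat), 1 ≤ k → exp2aRec k g n = l2 (gred n (pil g ^ k)) := by
  intro k
  induction k using Nat.strong_induction_on with
  | _ k ih =>
    intro hk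
    rw [exp2aRec]
    have hk0 : ¬ (k = 0) := by omega
    rw [dif_neg hk0]
    set m := k / 2 with hm
    by_cases hm0 : m = 0
    · -- k = 1
      have hk1 : k = 1 := by omega
      subst hk1
      simp only [hm0] at *
      rw [show exp2aRec 0 g n = [1, 0] from by rw [exp2aRec]; simp]
      norm_num
      rw [cmultP_eq hn, cmultP_eq hn, pil_l2]
      rw [gred_mul_gred_right hn]
      have h1 : pil [(1 : Int), 0] = 1 := by
        simp [pil, PySem.List.pyGetD, PySem.List.pyGet?, PySem.List.pyIdx?]
        rfl
      rw [h1]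
      norm_num
    · have hm1 : 1 ≤ m := by omega
      have hmlt : m < k := by omega
      rw [ih m hmlt hm1]
      by_cases hodd : k % 2 = 1
      · rw [if_pos hodd]
        rw [cmultP_eq hn, cmultP_eq hn, pil_l2, pil_l2]
        have hstep : gred n (gred n (pil g ^ m) * gred n (pil g ^ m))
            = gred n (pil g ^ m * pil g ^ m) :=
          gred_congr hn (Rn_mul (Rn_gred n _) (Rn_gred n _))
        rw [hstep, gred_mul_gred_right hn]
        congr 1
        have hk2 : k = 2 * m + 1 := by omega
        rw [hk2, pow_succ, two_mul, pow_add]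
        ring
      · rw [if_neg hodd]
        rw [cmultP_eq hn, pil_l2]
        rw [gred_congr hn (Rn_mul (Rn_gred n (pil g ^ m)) (Rn_gred n (pil g ^ m)))]
        congr 1
        have hk2 : k = 2 * m := by omega
        rw [hk2, two_mul, pow_add]

-- ===== VERDICT (by name: the statement is the Claim_ definition above) =====
theorem exp2a_spec : Claim_equal_exp2a := by
  intro e g n _ hpre
  obtain ⟨he, hn, _⟩ := hpre
  unfold Spec_exp2a exp2a exp2a_alt
  have hcast : e = ((e.toNat : Nat) : Int) := by omega
  set k := e.toNat with hk
  by_cases hk0 : k = 0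
  · -- both sides are [1, 0]
    have he0 : e = 0 := by omega
    subst he0
    rw [show k = 0 from hk0] at *
    rw [exp2aRec]
    simp [exp2aLoop]
  · have hk1 : 1 ≤ k := by omega
    rw [hcast]
    rw [exp2aLoop_eq hn k (k + 1) [1, 0] g hk1 (by omega)]
    rw [exp2aRec_eq hn g k hk1]
    have h1 : pil [(1 : Int), 0] = 1 := by
      simp [pil, PySem.List.pyGetD, PySem.List.pyGet?, PySem.List.pyIdx?]
      rfl
    rw [h1, one_mul]
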